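-- pv_equiv track=rewrite | github.com/pytorch/pytorch | pytorch-env/lib/python3.12/site-packages/setuptools/_vendor/inflect/__init__.py | make_pl_si_lists
-- ===== SOURCE A (Python) =====
-- import collections
-- from typing import (
--     TYPE_CHECKING,
--     Any,
--     Callable,
--     Dict,
--     Iterable,
--     List,
--     Literal,
--     Match,
--     Optional,
--     Sequence,
--     Tuple,
--     Union,
--     cast,
-- )
--
-- def enclose(s: str) -> str:
--     return f"(?:{s})"
--
-- def joinstem(cutpoint: Optional[int] = 0, words: Optional[Iterable[str]] = None) -> str:
--     """
--     Join stem of each word in words into a string for regex.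
--
--     Each word is truncated at cutpoint.
--
--     Cutpoint is usually negative indicating the number of letters to remove
--     from the end of each word.
--
--     >>> joinstem(-2, ["ephemeris", "iris", ".*itis"])
--     '(?:ephemer|ir|.*it)'
--
--     >>> joinstem(None, ["ephemeris"])
--     '(?:ephemeris)'
--
--     >>> joinstem(5, None)
--     '(?:)'
--     """
--     return enclose("|".join(w[:cutpoint] for w in words or []))
--
-- def bysize(words: Iterable[str]) -> Dict[int, set]:
--     """
--     From a list of words, return a dict of sets sorted by word length.
--
--     >>> words = ['ant', 'cat', 'dog', 'pig', 'frog', 'goat', 'horse', 'elephant']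
--     >>> ret = bysize(words)
--     >>> sorted(ret[3])
--     ['ant', 'cat', 'dog', 'pig']
--     >>> ret[5]
--     {'horse'}
--     """
--     res: Dict[int, set] = collections.defaultdict(set)
--     for w in words:
--         res[len(w)].add(w)
--     return res
--
-- def make_pl_si_lists(
--     lst: Iterable[str],
--     plending: str,
--     siendingsize: Optional[int],
--     dojoinstem: bool = True,
-- ):
--     """
--     given a list of singular words: lst
--
--     an ending to append to make the plural: plending
--
--     the number of characters to remove from the singular
--     before appending plending: siendingsize
--
--     a flag whether to create a joinstem: dojoinstem
--
--     return:
--     a list of pluralised words: si_list (called si because this is what you need to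
--     look for to make the singular)
--
--     the pluralised words as a dict of sets sorted by word length: si_bysize
--     the singular words as a dict of sets sorted by word length: pl_bysize
--     if dojoinstem is True: a regular expression that matches any of the stems: stem
--     """
--     if siendingsize is not None:
--         siendingsize = -siendingsize
--     si_list = [w[:siendingsize] + plending for w in lst]
--     pl_bysize = bysize(lst)
--     si_bysize = bysize(si_list)
--     if dojoinstem:
--         stem = joinstem(siendingsize, lst)
--         return si_list, si_bysize, pl_bysize, stem
--     else:
--         return si_list, si_bysize, pl_bysize
-- ===== SOURCE B (Python) =====
-- import collections
--
--
-- def enclose(s: str) -> str: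
--     return f"(?:{s})"
--
--
-- def make_pl_si_lists(lst, plending, siendingsize, dojoinstem=True):
--     words = list(lst)
--     cut = None if siendingsize is None else -siendingsize
--     stems = [w[:cut] for w in words]
--     si_list = [s + plending for s in stems]
--
--     def group(ws):
--         # group by length the other way round: first the distinct lengths in
--         # first-occurrence order, then one filtering scan per length
--         lengths = list(dict.fromkeys(len(w) for w in ws))
--         return collections.defaultdict(
--             set, {L: {w for w in ws if len(w) == L} for L in lengths}
--         )
--
--     if dojoinstem:
--         return si_list, group(si_list), group(words), enclose("|".join(stems))
--     return si_list, group(si_list), group(words)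
-- ===== Notes on version B (the rewrite author's own statement) =====
-- stated objective: alternative
-- what changed: A builds the two length-bucketed dicts with a single defaultdict-updating pass each (bysize); B groups the other way round: it first collects the distinct lengths in first-occurrence order and then runs one filtering scan per length to build each bucket, and it stages the computation differently (stems computed once, si_list derived from the stems). Pre_ excludes dojoinstem=False, where both return a 3-tuple outside the declared 4-tuple return type.
import Mathlib
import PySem

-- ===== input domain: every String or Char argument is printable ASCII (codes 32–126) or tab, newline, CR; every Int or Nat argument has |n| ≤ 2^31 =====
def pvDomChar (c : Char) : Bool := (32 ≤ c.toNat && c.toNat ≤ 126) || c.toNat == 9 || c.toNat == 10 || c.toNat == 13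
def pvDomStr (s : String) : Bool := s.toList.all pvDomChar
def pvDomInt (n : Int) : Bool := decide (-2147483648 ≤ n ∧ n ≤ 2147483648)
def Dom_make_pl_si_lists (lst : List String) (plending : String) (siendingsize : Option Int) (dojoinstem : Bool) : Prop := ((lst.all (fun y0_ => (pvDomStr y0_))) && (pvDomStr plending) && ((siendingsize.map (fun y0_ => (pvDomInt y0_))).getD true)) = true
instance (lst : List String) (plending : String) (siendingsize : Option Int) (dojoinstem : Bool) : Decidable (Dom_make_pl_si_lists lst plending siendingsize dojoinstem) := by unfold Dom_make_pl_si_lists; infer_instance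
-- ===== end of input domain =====

-- B groups by length via "distinct lengths, then one filter per length" instead of A's
-- dict-updating bysize pass, and derives si_list from the stems; same results, different algorithm.

-- ===== PORT A =====
def pvEnclose (s : String) : String := "(?:" ++ s ++ ")"

-- joinstem: "|".join(w[:cutpoint] for w in words), enclosed
def pvJoinstem (cutpoint : Option Int) (words : List String) : String :=
  pvEnclose (PySem.Str.join "|" (words.map (fun w => PySem.Str.slice w none cutpoint)))

-- bysize: defaultdict(set); res[len(w)].add(w)
def pvBysize (words : List String) : PySem.Dict Int (List String) :=
  words.foldl (fun d w => d.modify (PySem.Str.len w) [] (fun s => PySem.Set.add s w)) PySem.Dict.empty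

-- cut = the negated siendingsize (None stays None); si_list / pl_bysize / si_bysize inlined at their use sites
def make_pl_si_lists (lst : List String) (plending : String) (siendingsize : Option Int) (dojoinstem : Bool) : List String × (List (Int × List String)) × (List (Int × List String)) × Option String :=
  if dojoinstem then
    (lst.map (fun w => PySem.Str.slice w none (siendingsize.map (fun n => -n)) ++ plending),
     (pvBysize (lst.map (fun w => PySem.Str.slice w none (siendingsize.map (fun n => -n)) ++ plending))).items,
     (pvBysize lst).items,
     some (pvJoinstem (siendingsize.map (fun n => -n)) lst))
  else
    (lst.map (fun w => PySem.Str.slice w none (siendingsize.map (fun n => -n)) ++ plending),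
     (pvBysize (lst.map (fun w => PySem.Str.slice w none (siendingsize.map (fun n => -n)) ++ plending))).items,
     (pvBysize lst).items,
     none)

-- ===== PORT B =====
-- group(ws): the distinct lengths in first-occurrence order, each paired with the
-- deduplicated list of the words of that length (one filtering scan per length)
def pvGroup (ws : List String) : List (Int × List String) :=
  (PySem.Set.ofList (ws.map PySem.Str.len)).map
    (fun L => (L, PySem.Set.ofList (ws.filter (fun w => PySem.Str.len w == L))))

def make_pl_si_lists_alt (lst : List String) (plending : String) (siendingsize : Option Int) (dojoinstem : Bool) : List String × (List (Int × List String)) × (List (Int × List String)) × Option String :=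
  let cut := siendingsize.map (fun n => -n)
  let stems := lst.map (fun w => PySem.Str.slice w none cut)
  let si_list := stems.map (fun s => s ++ plending)
  (si_list, pvGroup si_list, pvGroup lst,
   if dojoinstem then some (pvEnclose (PySem.Str.join "|" stems)) else none)

-- ===== PRECONDITION & SPEC =====
-- Pre_ excludes dojoinstem = false, where A (and B) return a 3-tuple that lies outside the declared
-- 4-component return type (the Option String slot has no Python counterpart there).
def Pre_make_pl_si_lists (lst : List String) (plending : String) (siendingsize : Option Int) (dojoinstem : Bool) : Prop := dojoinstem = true
instance (lst : List String) (plending : String) (siendingsize : Option Int) (dojoinstem : Bool) : Decidable (Pre_make_pl_si_lists lst plending siendingsize dojoinstem) := by unfold Pre_make_pl_si_lists; infer_instance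
def pvWitness_make_pl_si_lists : List String × String × Option Int × Bool := (["cow", "ox"], "s", some 0, true)

def Spec_make_pl_si_lists (lst : List String) (plending : String) (siendingsize : Option Int) (dojoinstem : Bool) (out : List String × (List (Int × List String)) × (List (Int × List String)) × Option String) : Prop := out = make_pl_si_lists_alt lst plending siendingsize dojoinstem
instance (lst : List String) (plending : String) (siendingsize : Option Int) (dojoinstem : Bool) (out : List String × (List (Int × List String)) × (List (Int × List String)) × Option String) : Decidable (Spec_make_pl_si_lists lst plending siendingsize dojoinstem out) := by unfold Spec_make_pl_si_lists; infer_instance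

-- ===== CLAIM =====
def Claim_equal_make_pl_si_lists : Prop := ∀ (lst : List String) (plending : String) (siendingsize : Option Int) (dojoinstem : Bool), Dom_make_pl_si_lists lst plending siendingsize dojoinstem → Pre_make_pl_si_lists lst plending siendingsize dojoinstem → Spec_make_pl_si_lists lst plending siendingsize dojoinstem (make_pl_si_lists lst plending siendingsize dojoinstem)

-- ===== LEMMAS AND PROOFS =====

-- the bucket A's modify-loop leaves at key L is the (deduplicated) filter of the words of length L
theorem getD_bysize_loop (L : Int) :
    ∀ (ws : List String) (d : PySem.Dict Int (List String)),
    (ws.foldl (fun d w => d.modify (PySem.Str.len w) [] (fun s => PySem.Set.add s w)) d).getD L []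
      = PySem.Set.update (d.getD L []) (ws.filter (fun w => PySem.Str.len w == L)) := by
  intro ws
  induction ws with
  | nil => intro d; simp [PySem.Set.update]
  | cons w rest ih =>
    intro d
    by_cases h : PySem.Str.len w = L
    · simp only [List.foldl_cons, ih, List.filter_cons, h, beq_self_eq_true, if_true,
        PySem.Dict.getD_modify_self, PySem.Set.update, List.foldl_cons]
    · have hb : (PySem.Str.len w == L) = false := by simpa using h
      rw [List.foldl_cons, ih, List.filter_cons, hb,
        PySem.Dict.getD_modify_of_ne _ _ _ (fun hLe => h hLe.symm)]
      simp

-- A's bysize equals B's group, item list for item list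
theorem items_bysize_eq_group (ws : List String) : (pvBysize ws).items = pvGroup ws := by
  have hnd : (pvBysize ws).keys.Nodup := by
    have := PySem.Dict.nodup_keys_foldl_modify_key ws PySem.Str.len []
      (fun _ w => fun s => PySem.Set.add s w) PySem.Dict.empty
      (by simp)
    simpa [pvBysize] using this
  have hkeys : (pvBysize ws).keys = PySem.Set.ofList (ws.map PySem.Str.len) := by
    have := PySem.Dict.keys_foldl_modify_key (l := ws) (key := PySem.Str.len)
      (d0 := []) (f := fun _ w => fun s => PySem.Set.add s w) (d := PySem.Dict.empty)
    simpa [pvBysize, PySem.Dict.keys_empty, PySem.Set.update, PySem.Set.ofList_eq_foldl] using this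
  rw [PySem.Dict.items_eq_map_keys (pvBysize ws) hnd [], hkeys, pvGroup]
  refine List.map_congr_left (fun L _ => ?_)
  have := getD_bysize_loop L ws PySem.Dict.empty
  simp only [pvBysize, this, PySem.Dict.getD_empty, PySem.Set.update, PySem.Set.ofList_eq_foldl]

theorem make_pl_si_lists_spec_aux (lst : List String) (plending : String) (siendingsize : Option Int) (dojoinstem : Bool) :
    make_pl_si_lists lst plending siendingsize dojoinstem = make_pl_si_lists_alt lst plending siendingsize dojoinstem := by
  unfold make_pl_si_lists make_pl_si_lists_alt pvJoinstem
  cases dojoinstem <;>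
    simp only [Bool.false_eq_true, if_false, if_true, items_bysize_eq_group, List.map_map, Function.comp_def]

-- ===== VERDICT =====
theorem make_pl_si_lists_spec : Claim_equal_make_pl_si_lists := by
  intro lst plending siendingsize dojoinstem _ _
  unfold Spec_make_pl_si_lists
  exact make_pl_si_lists_spec_aux lst plending siendingsize dojoinstem
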